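-- pv_equiv track=rewrite | github.com/namin/argument-debugger | argsem.py | defense_depth
-- ===== SOURCE A (Python) =====
-- from typing import Dict, List, Set, Tuple, FrozenSet, Optional
--
-- def _F(atoms: List[str], attacks: Set[Tuple[str,str]], S: Set[str]) -> Set[str]:
--     atk = {a:set() for a in atoms}
--     for (u,v) in attacks:
--         if v in atk: atk[v].add(u)
--     defended = set()
--     for a in atoms:
--         ok = True
--         for b in atk[a]:
--             if not any((c,b) in attacks for c in S):
--                 ok = False; break
--         if ok:
--             defended.add(a)
--     return defended
--
-- def defense_depth(atoms: List[str], attacks: Set[Tuple[str,str]]) -> Dict[str, Optional[int]]: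
--     depth = {a: None for a in atoms}
--     S = set(); i = 0
--     while True:
--         T = _F(atoms, attacks, S)
--         if T == S: break
--         wave = T - S; i += 1
--         for a in wave:
--             if depth[a] is None: depth[a] = i
--         S = T
--     return depth
-- ===== SOURCE B (Python) =====
-- def defense_depth(atoms, attacks):
--     depth = dict.fromkeys(atoms)        # arg -> wave number (None = never accepted)
--     attacker_sets = {a: set() for a in depth}
--     targets = {}                        # u -> set of arguments u attacks
--     for (u, v) in attacks:
--         if v in attacker_sets:
--             attacker_sets[v].add(u)
--         targets.setdefault(u, set()).add(v)
--     out = set()                         # attackers already defeated by accepted arguments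
--     undecided = list(depth)
--     i = 0
--     while undecided:
--         newly = [a for a in undecided if attacker_sets[a] <= out]
--         if not newly:
--             break
--         i += 1
--         newset = set(newly)
--         undecided = [a for a in undecided if a not in newset]
--         for a in newly:
--             depth[a] = i
--             out |= targets.get(a, set())
--     return depth
-- ===== Notes on version B (the rewrite author's own statement) =====
-- stated objective: faster
-- what changed: Instead of recomputing the characteristic function F from scratch every round (rebuilding the attacker index and re-scanning the accepted set S for each attacker of each atom), B builds the attacker sets and a target index once, maintains the set of already-defeated attackers incrementally, and each round only rescans the still-undecided atoms, removing the inner scan over S entirely.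
import Mathlib
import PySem

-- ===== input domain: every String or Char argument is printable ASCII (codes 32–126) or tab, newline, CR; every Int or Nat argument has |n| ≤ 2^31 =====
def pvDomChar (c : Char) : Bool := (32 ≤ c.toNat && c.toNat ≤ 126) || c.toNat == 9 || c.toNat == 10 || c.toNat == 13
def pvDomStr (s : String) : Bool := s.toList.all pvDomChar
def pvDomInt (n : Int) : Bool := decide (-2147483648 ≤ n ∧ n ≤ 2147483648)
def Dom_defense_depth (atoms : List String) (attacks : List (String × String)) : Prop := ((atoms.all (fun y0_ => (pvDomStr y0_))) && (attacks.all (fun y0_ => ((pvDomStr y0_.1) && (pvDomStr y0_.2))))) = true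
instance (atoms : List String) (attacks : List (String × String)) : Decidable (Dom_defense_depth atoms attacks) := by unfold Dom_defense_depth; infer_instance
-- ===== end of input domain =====

-- B replaces A's per-round recomputation of the characteristic function (rebuilding the
-- attacker index and rescanning the accepted set S per attacker) by a once-built attacker/target
-- index with an incrementally grown defeated-attacker set, scanning only still-undecided atoms
-- each round (objective: faster; a timing run measured B faster).
-- ===== PORT A =====
-- helper: the characteristic function _F (atoms, attacks, S).
-- Python sets are PySem.Set; the inner 'for b in atk[a]: … break' loop computes an
-- order-independent all(...), ported as List.all; 'any((c,b) in attacks for c in S)' is S.any.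
def pyF (atoms : List String) (attacks : List (String × String)) (S : PySem.Set String) : PySem.Set String :=
  let atk0 : PySem.Dict String (PySem.Set String) :=
    atoms.foldl (fun d a => d.insert a PySem.Set.empty) PySem.Dict.empty
  let atk : PySem.Dict String (PySem.Set String) :=
    attacks.foldl (fun d uv =>
      if d.contains uv.2 then d.modify uv.2 PySem.Set.empty (fun s => PySem.Set.add s uv.1) else d) atk0
  atoms.foldl (fun defended a =>
    if (atk.getD a PySem.Set.empty).all (fun b => S.any (fun c => attacks.contains (c, b)))
    then PySem.Set.add defended a else defended) PySem.Set.empty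

-- the 'while True' loop of A; fuel is a totality device only (S grows strictly each
-- non-break round and stays within the distinct atoms, so atoms.length + 2 rounds always
-- reach the break; the equivalence proof never needs this fact since both loops share fuel).
def loopA (atoms : List String) (attacks : List (String × String)) :
    Nat → PySem.Dict String (Option Int) → PySem.Set String → Int → PySem.Dict String (Option Int)
  | 0, depth, _, _ => depth
  | fuel + 1, depth, S, i =>
    let T := pyF atoms attacks S
    if PySem.Set.equal T S then depth
    else
      let wave := PySem.Set.diff T S
      let i' := i + 1
      let depth' := wave.foldl (fun d a => if d.getD a none = none then d.insert a (some i') else d) depth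
      loopA atoms attacks fuel depth' T i'

def defense_depth (atoms : List String) (attacks : List (String × String)) : List (String × Option Int) :=
  let depth0 : PySem.Dict String (Option Int) :=
    atoms.foldl (fun d a => d.insert a none) PySem.Dict.empty
  (loopA atoms attacks (atoms.length + 2) depth0 PySem.Set.empty 0).items

-- ===== PORT B =====
-- the single 'for (u,v) in attacks' loop of Source B updates two dicts; ported as a pair-fold.
-- attacker_sets[v].add(u) / targets.setdefault(u,set()).add(v) are in-place set growth = Dict.modify.
def buildIdx (attackerSets0 : PySem.Dict String (PySem.Set String)) (attacks : List (String × String)) :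
    PySem.Dict String (PySem.Set String) × PySem.Dict String (PySem.Set String) :=
  attacks.foldl (fun p uv =>
    ((if p.1.contains uv.2 then p.1.modify uv.2 PySem.Set.empty (fun s => PySem.Set.add s uv.1) else p.1),
     p.2.modify uv.1 PySem.Set.empty (fun s => PySem.Set.add s uv.2)))
    (attackerSets0, PySem.Dict.empty)

-- the 'while undecided' loop of Source B; the body's 'for a in newly' updates depth and out together.
def loopB (targets attackerSets : PySem.Dict String (PySem.Set String)) :
    Nat → PySem.Dict String (Option Int) → PySem.Set String → List String → Int → PySem.Dict String (Option Int)
  | 0, depth, _, _, _ => depth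
  | fuel + 1, depth, out, undecided, i =>
    if undecided.isEmpty then depth
    else
      let newly := undecided.filter (fun a => PySem.Set.issubset (attackerSets.getD a PySem.Set.empty) out)
      if newly.isEmpty then depth
      else
        let i' := i + 1
        let newset := PySem.Set.ofList newly
        let undecided' := undecided.filter (fun a => !newset.contains a)
        let st := newly.foldl (fun (p : PySem.Dict String (Option Int) × PySem.Set String) a =>
          (p.1.insert a (some i'), PySem.Set.update p.2 (targets.getD a PySem.Set.empty))) (depth, out)
        loopB targets attackerSets fuel st.1 st.2 undecided' i'

def defense_depth_alt (atoms : List String) (attacks : List (String × String)) : List (String × Option Int) :=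
  -- dict.fromkeys(atoms): insert every key with value None (a duplicate overwrites in place)
  let depth0 : PySem.Dict String (Option Int) :=
    atoms.foldl (fun d a => d.insert a none) PySem.Dict.empty
  let attackerSets0 : PySem.Dict String (PySem.Set String) :=
    depth0.keys.foldl (fun d a => d.insert a PySem.Set.empty) PySem.Dict.empty
  let idx := buildIdx attackerSets0 attacks
  -- fuel: the loop drops at least one undecided atom per iteration, so it is a totality device only
  (loopB idx.2 idx.1 (atoms.length + 2) depth0 PySem.Set.empty depth0.keys 0).items

-- ===== PRECONDITION & SPEC =====
def Spec_defense_depth (atoms : List String) (attacks : List (String × String)) (out : List (String × Option Int)) : Prop := out = defense_depth_alt atoms attacks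
instance (atoms : List String) (attacks : List (String × String)) (out : List (String × Option Int)) : Decidable (Spec_defense_depth atoms attacks out) := by unfold Spec_defense_depth; infer_instance

-- ===== CLAIM (what is proved, stated in full; the proofs are below) =====
def Claim_equal_defense_depth : Prop := ∀ (atoms : List String) (attacks : List (String × String)), Dom_defense_depth atoms attacks → Spec_defense_depth atoms attacks (defense_depth atoms attacks)

-- ===== LEMMAS AND PROOFS =====

-- the defense condition "every attacker of a is attacked from S" (membership form)
def pvCond (attacks : List (String × String)) (S : List String) (a : String) : Prop :=
  ∀ b, (b, a) ∈ attacks → ∃ c ∈ S, (c, b) ∈ attacks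

-- a dict whose values are all the constant c looks up to c (with default c)
theorem pv_getD_mk_const {ν : Type} (s : List String) (c : ν) (x : String) :
    (PySem.Dict.mk (s.map (fun k => (k, c)))).getD x c = c := by
  induction s with
  | nil => simp [PySem.Dict.getD, PySem.Dict.get?]
  | cons k s ih =>
    rw [List.map_cons, PySem.Dict.getD_eq_get?_getD, PySem.Dict.get?_mk_cons]
    rw [PySem.Dict.getD_eq_get?_getD] at ih
    split
    · rfl
    · exact ih

-- inserting a constant value over a list builds the dict keyed by the distinct elements
theorem pv_foldl_insert_const {ν : Type} (l s : List String) (c : ν) :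
    l.foldl (fun d a => d.insert a c) (PySem.Dict.mk (s.map (fun k => (k, c))))
      = PySem.Dict.mk ((PySem.Set.update s l).map (fun k => (k, c))) := by
  induction l generalizing s with
  | nil => simp [PySem.Set.update_nil]
  | cons a l ih =>
    rw [List.foldl_cons, PySem.Set.update_cons]
    have hkeys : (PySem.Dict.mk (s.map (fun k => (k, c)))).keys = s := by
      simp [PySem.Dict.keys_mk, List.map_map, Function.comp_def]
    by_cases hm : a ∈ s
    · have hc : (PySem.Dict.mk (s.map (fun k => (k, c)))).contains a = true := by
        rw [PySem.Dict.contains_iff_mem_keys, hkeys]; exact hm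
      have hins : (PySem.Dict.mk (s.map (fun k => (k, c)))).insert a c
          = PySem.Dict.mk (s.map (fun k => (k, c))) := by
        apply PySem.Dict.ext
        rw [PySem.Dict.items_insert_of_contains _ _ hc]
        show (s.map (fun k => (k, c))).map _ = s.map (fun k => (k, c))
        rw [List.map_map]
        apply List.map_congr_left
        intro k _
        by_cases h : k = a <;> simp [h]
      rw [hins, ih, PySem.Set.add_of_mem hm]
    · have hc : (PySem.Dict.mk (s.map (fun k => (k, c)))).contains a = false := by
        simp [PySem.Dict.contains_eq_decide_mem_keys, hkeys, hm]
      have hins : (PySem.Dict.mk (s.map (fun k => (k, c)))).insert a c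
          = PySem.Dict.mk ((s ++ [a]).map (fun k => (k, c))) := by
        apply PySem.Dict.ext
        rw [PySem.Dict.items_insert_of_not_contains _ _ hc]
        simp
      rw [hins, ih, PySem.Set.add_of_not_mem hm]

theorem pv_foldl_insert_const_empty {ν : Type} (l : List String) (c : ν) :
    l.foldl (fun d a => d.insert a c) PySem.Dict.empty
      = PySem.Dict.mk ((PySem.Set.ofList l).map (fun k => (k, c))) := by
  have h := pv_foldl_insert_const l [] c
  simpa [PySem.Set.update_nil_left] using h

-- membership in the attacker set accumulated for an existing key a
theorem pv_atk_getD (l : List (String × String)) (d : PySem.Dict String (PySem.Set String))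
    (a : String) (hc : d.contains a = true) (x : String) :
    (x ∈ (l.foldl (fun d uv =>
        if d.contains uv.2 then d.modify uv.2 PySem.Set.empty (fun s => PySem.Set.add s uv.1) else d) d).getD a PySem.Set.empty)
      ↔ x ∈ d.getD a PySem.Set.empty ∨ (x, a) ∈ l := by
  induction l generalizing d with
  | nil => simp
  | cons uv l ih =>
    rw [List.foldl_cons]
    by_cases h : d.contains uv.2 = true
    · rw [if_pos h]
      have hc' : (d.modify uv.2 PySem.Set.empty (fun s => PySem.Set.add s uv.1)).contains a = true := by
        rw [PySem.Dict.contains_modify]; simp [hc]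
      rw [ih _ hc']
      by_cases ha : a = uv.2
      · subst ha
        rw [PySem.Dict.getD_modify_self]
        simp only [PySem.Set.mem_add, List.mem_cons, Prod.ext_iff]
        all_goals tauto
      · rw [PySem.Dict.getD_modify, if_neg ha]
        have hne : ¬ (x, a) = uv := by
          intro hcontra; apply ha; rw [← hcontra]
        simp only [List.mem_cons, hne, false_or]
    · rw [if_neg h, ih _ hc]
      have hne : ¬ (x, a) = uv := by
        intro hcontra; apply h; rw [← hcontra]; exact hc
      simp only [List.mem_cons, hne, false_or]

theorem pv_tg_getD (l : List (String × String)) (d : PySem.Dict String (PySem.Set String)) (c x : String) :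
    (x ∈ (l.foldl (fun d uv => d.modify uv.1 PySem.Set.empty (fun s => PySem.Set.add s uv.2)) d).getD c PySem.Set.empty)
      ↔ x ∈ d.getD c PySem.Set.empty ∨ (c, x) ∈ l := by
  induction l generalizing d with
  | nil => simp
  | cons uv l ih =>
    rw [List.foldl_cons, ih]
    by_cases hcu : c = uv.1
    · subst hcu
      rw [PySem.Dict.getD_modify_self]
      simp only [PySem.Set.mem_add, List.mem_cons, Prod.ext_iff]
      all_goals tauto
    · rw [PySem.Dict.getD_modify, if_neg hcu]
      have hne : ¬ (c, x) = uv := by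
        intro hcontra; apply hcu; rw [← hcontra]
      simp only [List.mem_cons, hne, false_or]

-- membership in a guarded set-building fold (A's 'defended' loop)
theorem pv_mem_foldl_add_if (p : String → Bool) (l : List String) (s0 : PySem.Set String) (y : String) :
    (y ∈ l.foldl (fun s a => if p a then PySem.Set.add s a else s) s0)
      ↔ y ∈ s0 ∨ (y ∈ l ∧ p y = true) := by
  induction l generalizing s0 with
  | nil => simp
  | cons a l ih =>
    rw [List.foldl_cons]
    by_cases h : p a = true
    · rw [if_pos h, ih, PySem.Set.mem_add]
      constructor
      · rintro ((h1 | h1) | h1)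
        · exact Or.inl h1
        · subst h1; exact Or.inr ⟨List.mem_cons_self .., h⟩
        · exact Or.inr ⟨List.mem_cons_of_mem _ h1.1, h1.2⟩
      · rintro (h1 | ⟨h1, h2⟩)
        · exact Or.inl (Or.inl h1)
        · rcases List.mem_cons.mp h1 with h3 | h3
          · exact Or.inl (Or.inr h3)
          · exact Or.inr ⟨h3, h2⟩
    · rw [if_neg h, ih]
      constructor
      · rintro (h1 | h1)
        · exact Or.inl h1
        · exact Or.inr ⟨List.mem_cons_of_mem _ h1.1, h1.2⟩
      · rintro (h1 | ⟨h1, h2⟩)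
        · exact Or.inl h1
        · rcases List.mem_cons.mp h1 with h3 | h3
          · subst h3; exact absurd h2 h
          · exact Or.inr ⟨h3, h2⟩

theorem pv_nodup_foldl_add_if (p : String → Bool) (l : List String) (s0 : PySem.Set String)
    (h : s0.Nodup) :
    (l.foldl (fun s a => if p a then PySem.Set.add s a else s) s0).Nodup := by
  induction l generalizing s0 with
  | nil => exact h
  | cons a l ih =>
    rw [List.foldl_cons]
    apply ih
    by_cases hp : p a = true
    · rw [if_pos hp]; exact PySem.Set.nodup_add _ _ h
    · rw [if_neg hp]; exact h

-- characterisation of the characteristic function _F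
theorem pv_mem_pyF (atoms : List String) (attacks : List (String × String)) (S : PySem.Set String) (a : String) :
    a ∈ pyF atoms attacks S ↔ a ∈ atoms ∧ pvCond attacks S a := by
  have hc0 : ∀ y ∈ atoms, (PySem.Dict.mk ((PySem.Set.ofList atoms).map
      (fun k => (k, (PySem.Set.empty : PySem.Set String))))).contains y = true := by
    intro y hy
    rw [PySem.Dict.contains_iff_mem_keys]
    simp [PySem.Dict.keys_mk, List.map_map, Function.comp_def, PySem.Set.mem_ofList, hy]
  simp only [pyF, pv_foldl_insert_const_empty]
  rw [pv_mem_foldl_add_if]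
  constructor
  · rintro (h | ⟨hy, hp⟩)
    · cases h
    · refine ⟨hy, ?_⟩
      intro b hb
      have hbmem : b ∈ (attacks.foldl (fun d uv =>
          if d.contains uv.2 then d.modify uv.2 PySem.Set.empty (fun s => PySem.Set.add s uv.1) else d)
          (PySem.Dict.mk ((PySem.Set.ofList atoms).map (fun k => (k, PySem.Set.empty))))).getD a PySem.Set.empty :=
        (pv_atk_getD attacks _ a (hc0 a hy) b).mpr (Or.inr hb)
      have hball := List.all_eq_true.mp hp b hbmem
      rcases List.any_eq_true.mp hball with ⟨c, hcS, hcb⟩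
      exact ⟨c, hcS, by simpa using hcb⟩
  · rintro ⟨hy, hcond⟩
    refine Or.inr ⟨hy, ?_⟩
    apply List.all_eq_true.mpr
    intro b hb
    have hmem := (pv_atk_getD attacks _ a (hc0 a hy) b).mp hb
    have hba : (b, a) ∈ attacks := by
      rcases hmem with h | h
      · rw [pv_getD_mk_const] at h; cases h
      · exact h
    rcases hcond b hba with ⟨c, hcS, hcb⟩
    apply List.any_eq_true.mpr
    exact ⟨c, hcS, by simpa using hcb⟩

theorem pv_nodup_pyF (atoms : List String) (attacks : List (String × String)) (S : PySem.Set String) :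
    (pyF atoms attacks S).Nodup := by
  simp only [pyF]
  exact pv_nodup_foldl_add_if _ _ _ List.nodup_nil

-- overwriting the value at keys from K leaves lookups at other keys unchanged
theorem pv_get?_map_overwrite (K : List String) (v : Option Int) (its : List (String × Option Int))
    (a : String) (ha : a ∉ K) :
    (PySem.Dict.mk (its.map (fun p => if p.1 ∈ K then (p.1, v) else p))).get? a
      = (PySem.Dict.mk its).get? a := by
  induction its with
  | nil => rfl
  | cons p its ih =>
    rw [List.map_cons]
    by_cases hk : p.1 ∈ K
    · rw [if_pos hk]
      have hne : (p.1 == a) = false := by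
        simp; intro hcontra; exact ha (hcontra ▸ hk)
      rw [PySem.Dict.get?_mk_cons, PySem.Dict.get?_mk_cons, hne]
      simp only [Bool.false_eq_true, if_false]
      exact ih
    · rw [if_neg hk]
      rw [PySem.Dict.get?_mk_cons, PySem.Dict.get?_mk_cons]
      split
      · rfl
      · exact ih

theorem pv_keys_map_overwrite (K : List String) (v : Option Int) (its : List (String × Option Int)) :
    (PySem.Dict.mk (its.map (fun p => if p.1 ∈ K then (p.1, v) else p))).keys
      = (PySem.Dict.mk its).keys := by
  simp only [PySem.Dict.keys_mk, List.map_map]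
  apply List.map_congr_left
  intro p _
  by_cases h : p.1 ∈ K <;> simp [h]

-- A's wave loop: with all keys present and still None, it overwrites exactly the keys of K
theorem pv_updA (v : Option Int) (K : List String) (hK : K.Nodup) :
    ∀ (d : PySem.Dict String (Option Int)),
    (∀ a ∈ K, d.getD a none = none) → (∀ a ∈ K, d.contains a = true) →
    K.foldl (fun d a => if d.getD a none = none then d.insert a v else d) d
      = PySem.Dict.mk (d.items.map (fun p => if p.1 ∈ K then (p.1, v) else p)) := by
  induction K with
  | nil => intro d _ _; simp
  | cons a K ih =>
    intro d hnone hmem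
    have haK : a ∉ K := (List.nodup_cons.mp hK).1
    rw [List.foldl_cons, if_pos (hnone a (List.mem_cons_self ..))]
    rw [ih (List.nodup_cons.mp hK).2 (d.insert a v)
      (fun b hb => by
        have hba : b ≠ a := fun hc => haK (hc ▸ hb)
        rw [PySem.Dict.getD_insert_of_ne _ _ _ hba]
        exact hnone b (List.mem_cons_of_mem _ hb))
      (fun b hb => by
        rw [PySem.Dict.contains_insert]
        simp [hmem b (List.mem_cons_of_mem _ hb)])]
    apply PySem.Dict.ext
    show ((d.insert a v).items.map _) = _
    rw [PySem.Dict.items_insert_of_contains _ _ (hmem a (List.mem_cons_self ..)), List.map_map]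
    apply List.map_congr_left
    intro p _
    by_cases h1 : p.1 = a
    · simp [h1, haK]
    · have : (p.1 == a) = false := by simp [h1]
      by_cases h2 : p.1 ∈ K <;> simp [this, h1, h2, Function.comp]

-- B's unconditional overwrite loop does the same
theorem pv_updB (v : Option Int) (K : List String) :
    ∀ (d : PySem.Dict String (Option Int)), (∀ a ∈ K, d.contains a = true) →
    K.foldl (fun d a => d.insert a v) d
      = PySem.Dict.mk (d.items.map (fun p => if p.1 ∈ K then (p.1, v) else p)) := by
  induction K with
  | nil => intro d _; simp
  | cons a K ih =>
    intro d hmem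
    rw [List.foldl_cons]
    rw [ih (d.insert a v)
      (fun b hb => by
        rw [PySem.Dict.contains_insert]
        simp [hmem b (List.mem_cons_of_mem _ hb)])]
    apply PySem.Dict.ext
    show ((d.insert a v).items.map _) = _
    rw [PySem.Dict.items_insert_of_contains _ _ (hmem a (List.mem_cons_self ..)), List.map_map]
    apply List.map_congr_left
    intro p _
    by_cases h1 : p.1 = a
    · simp [h1]
    · have : (p.1 == a) = false := by simp [h1]
      by_cases h2 : p.1 ∈ K <;> simp [this, h1, h2, Function.comp]

-- B's incremental out-set growth
theorem pv_mem_foldl_update (K : List String) (g : String → PySem.Set String) :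
    ∀ (out : PySem.Set String) (y : String),
    (y ∈ K.foldl (fun o a => PySem.Set.update o (g a)) out) ↔ y ∈ out ∨ ∃ a ∈ K, y ∈ g a := by
  induction K with
  | nil => simp
  | cons a K ih =>
    intro out y
    rw [List.foldl_cons, ih, PySem.Set.mem_update]
    constructor
    · rintro ((h1 | h1) | ⟨b, hb, hyb⟩)
      · exact Or.inl h1
      · exact Or.inr ⟨a, List.mem_cons_self .., h1⟩
      · exact Or.inr ⟨b, List.mem_cons_of_mem _ hb, hyb⟩
    · rintro (h1 | ⟨b, hb, hyb⟩)
      · exact Or.inl (Or.inl h1)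
      · rcases List.mem_cons.mp hb with h2 | h2
        · subst h2; exact Or.inl (Or.inr hyb)
        · exact Or.inr ⟨b, h2, hyb⟩

-- the two round loops agree under the simulation invariant
theorem pv_loop_eq (atoms : List String) (attacks : List (String × String))
    (atk tg : PySem.Dict String (PySem.Set String))
    (hatk : ∀ a ∈ atoms, ∀ x : String, x ∈ atk.getD a PySem.Set.empty ↔ (x, a) ∈ attacks)
    (htg : ∀ c x : String, x ∈ tg.getD c PySem.Set.empty ↔ (c, x) ∈ attacks) :
    ∀ (fuel : Nat) (d : PySem.Dict String (Option Int)) (S out : PySem.Set String)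
      (undecided : List String) (i : Int),
    d.keys = PySem.Set.ofList atoms →
    (∀ a, a ∉ S → d.getD a none = none) →
    (∀ a ∈ S, a ∈ atoms) →
    (∀ a ∈ S, pvCond attacks S a) →
    (∀ x : String, x ∈ out ↔ ∃ c ∈ S, (c, x) ∈ attacks) →
    undecided = (PySem.Set.ofList atoms).filter (fun a => !S.contains a) →
    loopA atoms attacks fuel d S i = loopB tg atk fuel d out undecided i := by
  have hcb : ∀ (s : PySem.Set String) (y : String), s.contains y = decide (y ∈ s) := by
    intro s y
    by_cases h : y ∈ s
    · simp [h]
    · simp only [h, decide_false]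
      cases hc : s.contains y
      · rfl
      · exact absurd ((PySem.Set.contains_iff s y).mp hc) h
  intro fuel
  induction fuel with
  | zero =>
    intro d S out und i _ _ _ _ _ _
    rfl
  | succ fuel ih =>
    intro d S out undecided i hkeys hnone hSsub hSF hout hund
    have hT := pv_mem_pyF atoms attacks S
    have hST : ∀ c ∈ S, c ∈ pyF atoms attacks S := fun c hc => (hT c).mpr ⟨hSsub c hc, hSF c hc⟩
    have hdcont : ∀ a ∈ atoms, d.contains a = true := by
      intro a ha
      rw [PySem.Dict.contains_iff_mem_keys, hkeys]
      exact (PySem.Set.mem_ofList atoms a).mpr ha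
    have hundmem : ∀ a, a ∈ undecided ↔ (a ∈ atoms ∧ a ∉ S) := by
      intro a
      rw [hund, List.mem_filter, hcb]
      simp [PySem.Set.mem_ofList]
    have hnewly : ∀ a, (a ∈ undecided.filter (fun a => PySem.Set.issubset (atk.getD a PySem.Set.empty) out))
        ↔ (a ∈ pyF atoms attacks S ∧ a ∉ S) := by
      intro a
      rw [List.mem_filter]
      constructor
      · rintro ⟨hau, hp⟩
        have ha := (hundmem a).mp hau
        refine ⟨(hT a).mpr ⟨ha.1, ?_⟩, ha.2⟩
        intro b hb
        exact (hout b).mp ((PySem.Set.issubset_iff _ _).mp hp b ((hatk a ha.1 b).mpr hb))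
      · rintro ⟨haT, haS⟩
        obtain ⟨ha1, hcond⟩ := (hT a).mp haT
        refine ⟨(hundmem a).mpr ⟨ha1, haS⟩, ?_⟩
        apply (PySem.Set.issubset_iff _ _).mpr
        intro b hb
        exact (hout b).mpr (hcond b ((hatk a ha1 b).mp hb))
    rw [loopA, loopB]
    by_cases heq : PySem.Set.equal (pyF atoms attacks S) S = true
    · have hTS := (PySem.Set.equal_iff _ _).mp heq
      have hnil : undecided.filter (fun a => PySem.Set.issubset (atk.getD a PySem.Set.empty) out) = [] := by
        rw [List.filter_eq_nil_iff]
        intro a ha hp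
        have h2 := (hnewly a).mp (List.mem_filter.mpr ⟨ha, hp⟩)
        exact h2.2 ((hTS a).mp h2.1)
      rw [if_pos heq]
      by_cases hu : undecided.isEmpty = true
      · rw [if_pos hu]
      · rw [if_neg hu]
        simp only [hnil, List.isEmpty_nil, if_true]
    · obtain ⟨x, hxT, hxS⟩ : ∃ x, x ∈ pyF atoms attacks S ∧ x ∉ S := by
        by_contra hcon
        push Not at hcon
        exact heq ((PySem.Set.equal_iff _ _).mpr (fun y => ⟨fun hy => hcon y hy, fun hy => hST y hy⟩))
      have hxnew := (hnewly x).mpr ⟨hxT, hxS⟩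
      have hxund : x ∈ undecided := (List.mem_filter.mp hxnew).1
      have hune : undecided.isEmpty = false := by
        cases undecided
        · cases hxund
        · rfl
      have hnne : (undecided.filter (fun a => PySem.Set.issubset (atk.getD a PySem.Set.empty) out)).isEmpty = false := by
        cases hn : undecided.filter (fun a => PySem.Set.issubset (atk.getD a PySem.Set.empty) out)
        · rw [hn] at hxnew; cases hxnew
        · rfl
      rw [if_neg heq, hune]
      simp only [Bool.false_eq_true, if_false, hnne]
      rw [PySem.List.foldl_prod_mk
        (f := fun (dd : PySem.Dict String (Option Int)) a => dd.insert a (some (i + 1)))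
        (g := fun (o : PySem.Set String) a => PySem.Set.update o (tg.getD a PySem.Set.empty))]
      have hwave_nodup : (PySem.Set.diff (pyF atoms attacks S) S).Nodup :=
        PySem.Set.nodup_diff _ _ (pv_nodup_pyF atoms attacks S)
      have hKiff : ∀ y, (y ∈ PySem.Set.diff (pyF atoms attacks S) S
          ↔ y ∈ undecided.filter (fun a => PySem.Set.issubset (atk.getD a PySem.Set.empty) out)) :=
        fun y => (PySem.Set.mem_diff _ _ y).trans (hnewly y).symm
      have hA := pv_updA (some (i + 1)) (PySem.Set.diff (pyF atoms attacks S) S) hwave_nodup d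
        (fun a ha => hnone a ((PySem.Set.mem_diff _ _ a).mp ha).2)
        (fun a ha => hdcont a ((hT a).mp ((PySem.Set.mem_diff _ _ a).mp ha).1).1)
      have hB := pv_updB (some (i + 1))
        (undecided.filter (fun a => PySem.Set.issubset (atk.getD a PySem.Set.empty) out)) d
        (fun a ha => hdcont a ((hT a).mp ((hnewly a).mp ha).1).1)
      have hsame : PySem.Dict.mk (d.items.map (fun p =>
            if p.1 ∈ PySem.Set.diff (pyF atoms attacks S) S then (p.1, some (i + 1)) else p))
          = PySem.Dict.mk (d.items.map (fun p =>
            if p.1 ∈ undecided.filter (fun a => PySem.Set.issubset (atk.getD a PySem.Set.empty) out)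
            then (p.1, some (i + 1)) else p)) := by
        apply PySem.Dict.ext
        show d.items.map _ = d.items.map _
        apply List.map_congr_left
        intro p _
        by_cases hm : p.1 ∈ PySem.Set.diff (pyF atoms attacks S) S
        · rw [if_pos hm, if_pos ((hKiff p.1).mp hm)]
        · rw [if_neg hm, if_neg (fun hc => hm ((hKiff p.1).mpr hc))]
      rw [hA, hB, ← hsame]
      apply ih
      · rw [pv_keys_map_overwrite]
        exact hkeys
      · intro a haT
        have haS : a ∉ S := fun hc => haT (hST a hc)
        have haK : a ∉ PySem.Set.diff (pyF atoms attacks S) S :=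
          fun hc => haT ((PySem.Set.mem_diff _ _ a).mp hc).1
        rw [PySem.Dict.getD_eq_get?_getD, pv_get?_map_overwrite _ _ _ _ haK,
          ← PySem.Dict.getD_eq_get?_getD]
        exact hnone a haS
      · exact fun a ha => ((hT a).mp ha).1
      · intro a ha b hb
        obtain ⟨c, hcS, hcb⟩ := ((hT a).mp ha).2 b hb
        exact ⟨c, hST c hcS, hcb⟩
      · intro y
        rw [pv_mem_foldl_update]
        constructor
        · rintro (hy | ⟨a, haK, hy⟩)
          · obtain ⟨c, hcS, hcy⟩ := (hout y).mp hy
            exact ⟨c, hST c hcS, hcy⟩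
          · exact ⟨a, ((hnewly a).mp haK).1, (htg a y).mp hy⟩
        · rintro ⟨c, hcT, hcy⟩
          by_cases hcS : c ∈ S
          · exact Or.inl ((hout y).mpr ⟨c, hcS, hcy⟩)
          · exact Or.inr ⟨c, (hnewly c).mpr ⟨hcT, hcS⟩, (htg c y).mpr hcy⟩
      · have hnewly' := hnewly
        rw [hund] at hnewly'
        rw [hund, List.filter_filter]
        apply List.filter_congr
        intro a _
        rw [hcb, hcb, hcb]
        have hmofl : (a ∈ PySem.Set.ofList (((PySem.Set.ofList atoms).filter
            (fun a => !S.contains a)).filter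
            (fun a => PySem.Set.issubset (atk.getD a PySem.Set.empty) out)))
            ↔ (a ∈ pyF atoms attacks S ∧ a ∉ S) := by
          rw [PySem.Set.mem_ofList]; exact hnewly' a
        by_cases h1 : a ∈ pyF atoms attacks S <;> by_cases h2 : a ∈ S
        · rw [decide_eq_false (fun hc => (hmofl.mp hc).2 h2), decide_eq_true h2, decide_eq_true h1]; rfl
        · rw [decide_eq_true (hmofl.mpr ⟨h1, h2⟩), decide_eq_false h2, decide_eq_true h1]; rfl
        · exact absurd (hST a h2) h1
        · rw [decide_eq_false (fun hc => h1 (hmofl.mp hc).1), decide_eq_false h2, decide_eq_false h1]; rfl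

-- ===== VERDICT (by name: the statement is the Claim_ definition above) =====
theorem defense_depth_spec : Claim_equal_defense_depth := by
  intro atoms attacks _
  unfold Spec_defense_depth defense_depth defense_depth_alt
  have hdepthkeys : (atoms.foldl (fun d a => d.insert a (none : Option Int)) PySem.Dict.empty).keys
      = PySem.Set.ofList atoms := by
    rw [PySem.Dict.keys_foldl_insert atoms (fun _ _ => (none : Option Int)) PySem.Dict.empty,
      PySem.Dict.keys_empty, PySem.Set.update_nil_left]
  have hsets0 : (PySem.Set.ofList atoms).foldl
        (fun d a => d.insert a (PySem.Set.empty : PySem.Set String)) PySem.Dict.empty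
      = PySem.Dict.mk ((PySem.Set.ofList atoms).map (fun k => (k, (PySem.Set.empty : PySem.Set String)))) := by
    rw [pv_foldl_insert_const_empty, PySem.Set.ofList_ofList]
  simp only [buildIdx]
  have hsplit := PySem.List.foldl_prod_mk
      (f := fun (dd : PySem.Dict String (PySem.Set String)) (uv : String × String) =>
        if dd.contains uv.2 then dd.modify uv.2 PySem.Set.empty (fun s => PySem.Set.add s uv.1) else dd)
      (g := fun (dd : PySem.Dict String (PySem.Set String)) (uv : String × String) =>
        dd.modify uv.1 PySem.Set.empty (fun s => PySem.Set.add s uv.2))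
      (l := attacks)
      (a := PySem.Dict.mk ((PySem.Set.ofList atoms).map (fun k => (k, (PySem.Set.empty : PySem.Set String)))))
      (b := (PySem.Dict.empty : PySem.Dict String (PySem.Set String)))
  rw [hdepthkeys, hsets0, hsplit]
  apply congrArg PySem.Dict.items
  apply pv_loop_eq atoms attacks
  · -- hatk
    intro a ha x
    have hc : (PySem.Dict.mk ((PySem.Set.ofList atoms).map
        (fun k => (k, (PySem.Set.empty : PySem.Set String))))).contains a = true := by
      rw [PySem.Dict.contains_iff_mem_keys]
      simp [PySem.Dict.keys_mk, List.map_map, Function.comp_def, PySem.Set.mem_ofList, ha]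
    rw [pv_atk_getD attacks _ a hc x]
    constructor
    · rintro (h | h)
      · rw [pv_getD_mk_const] at h; cases h
      · exact h
    · exact Or.inr
  · -- htg
    intro c x
    rw [pv_tg_getD]
    simp [PySem.Dict.getD_empty]
  · -- keys
    exact hdepthkeys
  · -- values all none
    intro a _
    rw [pv_foldl_insert_const_empty, pv_getD_mk_const]
  · -- S ⊆ atoms (S empty)
    intro a ha; cases ha
  · -- S ⊆ F(S) (S empty)
    intro a ha; cases ha
  · -- out characterisation (both sides empty)
    intro x
    constructor
    · intro hx; cases hx
    · rintro ⟨c, hc, -⟩; cases hc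
  · -- initial undecided list
    exact (List.filter_eq_self.mpr (fun a _ => rfl)).symm
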